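-- pv_equiv track=rewrite | github.com/Santhakumarramesh/job-automation | services/resume_content_selector.py | _filter_additions
-- ===== SOURCE A (Python) =====
-- from typing import Optional
--
-- def _filter_additions(
--     additions: list[str],
--     coverage: Optional[dict],
--     supported: list[str],
--     partial: list[str],
-- ) -> tuple[list[str], list[str]]:
--     supported_lower = {s.lower() for s in supported}
--     partial_lower = {s.lower() for s in partial}
--     support_map = {}
--     if coverage:
--         support_map = {str(k).lower(): str(v) for k, v in (coverage.get("support_level_map") or {}).items()}
--
--     supported_out: list[str] = []
--     familiar_out: list[str] = []
--     for raw in additions: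
--         if not raw:
--             continue
--         low = raw.lower().strip()
--         if not low:
--             continue
--         if low in supported_lower:
--             if raw not in supported_out:
--                 supported_out.append(raw)
--             continue
--         if low in partial_lower:
--             if raw not in familiar_out:
--                 familiar_out.append(raw)
--             continue
--         level = support_map.get(low)
--         if level == "supported":
--             if raw not in supported_out:
--                 supported_out.append(raw)
--         elif level == "partially_supported":
--             if raw not in familiar_out:
--                 familiar_out.append(raw)
--     return supported_out, familiar_out
-- ===== SOURCE B (Python) =====
-- def _filter_additions(
--     additions,
--     coverage,
--     supported,
--     partial,
-- ):
--     # Staged pipeline: (1) one merged classification dict layered in reverse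
--     # precedence, (2) tag each cleaned addition with its category, (3) collect
--     # each category with dict.fromkeys for order-preserving dedup.
--     merged = {}
--     if coverage:
--         for k, v in (coverage.get("support_level_map") or {}).items():
--             merged[str(k).lower()] = {"supported": "s", "partially_supported": "f"}.get(str(v), "x")
--     for p in partial:
--         merged[p.lower()] = "f"
--     for s in supported:
--         merged[s.lower()] = "s"
--
--     tagged = []
--     for raw in additions:
--         if not raw:
--             continue
--         low = raw.lower().strip()
--         if not low:
--             continue
--         tagged.append((raw, merged.get(low)))
--
--     supported_out = list(dict.fromkeys(r for r, c in tagged if c == "s"))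
--     familiar_out = list(dict.fromkeys(r for r, c in tagged if c == "f"))
--     return supported_out, familiar_out
-- ===== Notes on version B (the rewrite author's own statement) =====
-- stated objective: alternative
-- what changed: Replaces A's single interleaved loop (three-container precedence chain plus membership-guarded appends into two output lists) by a staged pipeline: one merged classification dict built by layering sources in reverse precedence, a tagging pass producing (raw, category) pairs, and two order-preserving dedup collections via dict.fromkeys.
import Mathlib
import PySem

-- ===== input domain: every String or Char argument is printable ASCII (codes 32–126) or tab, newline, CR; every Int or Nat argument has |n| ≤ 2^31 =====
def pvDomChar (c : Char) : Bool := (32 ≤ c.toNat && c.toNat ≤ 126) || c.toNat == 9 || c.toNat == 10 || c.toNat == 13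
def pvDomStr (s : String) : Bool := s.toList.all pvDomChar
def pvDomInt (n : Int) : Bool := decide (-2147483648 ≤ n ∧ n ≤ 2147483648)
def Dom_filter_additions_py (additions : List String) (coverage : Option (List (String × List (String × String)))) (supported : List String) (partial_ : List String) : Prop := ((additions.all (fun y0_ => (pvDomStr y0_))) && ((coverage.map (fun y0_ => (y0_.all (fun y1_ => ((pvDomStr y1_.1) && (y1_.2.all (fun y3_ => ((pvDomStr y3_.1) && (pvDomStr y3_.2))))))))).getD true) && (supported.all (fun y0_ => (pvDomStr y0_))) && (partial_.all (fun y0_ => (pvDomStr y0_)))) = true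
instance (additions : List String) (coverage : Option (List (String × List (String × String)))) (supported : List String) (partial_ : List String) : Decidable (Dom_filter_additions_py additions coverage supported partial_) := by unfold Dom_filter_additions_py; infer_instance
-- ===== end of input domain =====

-- B replaces A's single interleaved classify-and-append loop by a staged pipeline:
-- a merged classification dict layered in reverse precedence, a tagging pass, and
-- two dict.fromkeys dedup collections (objective: alternative decomposition).

-- ===== PORT A =====
def filter_additions_py (additions : List String) (coverage : Option (List (String × List (String × String)))) (supported : List String) (partial_ : List String) : List String × List String :=
  let supported_lower : PySem.Set String := PySem.Set.ofList (supported.map PySem.Str.lower)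
  let partial_lower : PySem.Set String := PySem.Set.ofList (partial_.map PySem.Str.lower)
  let support_map : PySem.Dict String String :=
    match coverage with
    | none => PySem.Dict.empty
    | some c =>
      if c = [] then PySem.Dict.empty
      else
        ((PySem.Dict.get? (PySem.Dict.mk c) "support_level_map").getD []).foldl
          (fun d kv => d.insert (PySem.Str.lower kv.1) kv.2) PySem.Dict.empty
  additions.foldl
    (fun st raw =>
      if raw = "" then st
      else
        let low := PySem.Str.strip (PySem.Str.lower raw)
        if low = "" then st
        else if low ∈ supported_lower then
          (if raw ∈ st.1 then st else (st.1 ++ [raw], st.2))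
        else if low ∈ partial_lower then
          (if raw ∈ st.2 then st else (st.1, st.2 ++ [raw]))
        else
          let level := support_map.get? low
          if level = some "supported" then
            (if raw ∈ st.1 then st else (st.1 ++ [raw], st.2))
          else if level = some "partially_supported" then
            (if raw ∈ st.2 then st else (st.1, st.2 ++ [raw]))
          else st)
    ([], [])

-- ===== PORT B =====
-- {"supported": "s", "partially_supported": "f"}.get(str(v), "x")
def pvClassify (v : String) : String :=
  (PySem.Dict.get? (PySem.Dict.mk [("supported", "s"), ("partially_supported", "f")]) v).getD "x"

def filter_additions_py_alt (additions : List String) (coverage : Option (List (String × List (String × String)))) (supported : List String) (partial_ : List String) : List String × List String :=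
  let m0 : PySem.Dict String String :=
    match coverage with
    | none => PySem.Dict.empty
    | some c =>
      if c = [] then PySem.Dict.empty
      else
        ((PySem.Dict.get? (PySem.Dict.mk c) "support_level_map").getD []).foldl
          (fun d kv => d.insert (PySem.Str.lower kv.1) (pvClassify kv.2)) PySem.Dict.empty
  let m1 : PySem.Dict String String :=
    partial_.foldl (fun d p => d.insert (PySem.Str.lower p) "f") m0
  let merged : PySem.Dict String String :=
    supported.foldl (fun d s => d.insert (PySem.Str.lower s) "s") m1
  let tagged : List (String × Option String) :=
    additions.foldl
      (fun acc raw =>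
        if raw = "" then acc
        else
          let low := PySem.Str.strip (PySem.Str.lower raw)
          if low = "" then acc
          else acc ++ [(raw, merged.get? low)]) []
  (PySem.List.dedup (tagged.filterMap (fun rc => if rc.2 = some "s" then some rc.1 else none)),
   PySem.List.dedup (tagged.filterMap (fun rc => if rc.2 = some "f" then some rc.1 else none)))

-- ===== PRECONDITION & SPEC =====
def Spec_filter_additions_py (additions : List String) (coverage : Option (List (String × List (String × String)))) (supported : List String) (partial_ : List String) (out : List String × List String) : Prop := out = filter_additions_py_alt additions coverage supported partial_
instance (additions : List String) (coverage : Option (List (String × List (String × String)))) (supported : List String) (partial_ : List String) (out : List String × List String) : Decidable (Spec_filter_additions_py additions coverage supported partial_ out) := by unfold Spec_filter_additions_py; infer_instance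

-- ===== CLAIM (what is proved, stated in full; the proofs are below) =====
def Claim_equal_filter_additions_py : Prop := ∀ (additions : List String) (coverage : Option (List (String × List (String × String)))) (supported : List String) (partial_ : List String), Dom_filter_additions_py additions coverage supported partial_ → Spec_filter_additions_py additions coverage supported partial_ (filter_additions_py additions coverage supported partial_)

-- ===== LEMMAS AND PROOFS =====

-- A constant-valued insert layer: lookup hits iff the key is one of the lowered entries.
theorem pv_get?_layer_const (xs : List String) (v : String) (d : PySem.Dict String String) (k : String) :
    PySem.Dict.get? (xs.foldl (fun d s => d.insert (PySem.Str.lower s) v) d) k =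
      if k ∈ PySem.Set.ofList (xs.map PySem.Str.lower) then some v else PySem.Dict.get? d k := by
  induction xs generalizing d with
  | nil => simp [PySem.Set.ofList]
  | cons x xs ih =>
    simp only [List.foldl_cons, ih, List.map_cons, PySem.Set.mem_ofList, List.mem_cons]
    by_cases hm : k ∈ List.map PySem.Str.lower xs
    · simp [hm]
    · simp only [hm]
      by_cases hk : k = PySem.Str.lower x
      · subst hk
        simp [PySem.Dict.get?_insert_self]
      · simp [hk, PySem.Dict.get?_insert_of_ne _ _ hk]

theorem pv_get?_layer_items (val : String → String) (items : List (String × String))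
    (d : PySem.Dict String String) (k : String) :
    PySem.Dict.get? (items.foldl (fun d kv => d.insert (PySem.Str.lower kv.1) (val kv.2)) d) k =
      (match items.reverse.find? (fun kv => PySem.Str.lower kv.1 == k) with
       | some kv => some (val kv.2)
       | none => PySem.Dict.get? d k) := by
  induction items generalizing d with
  | nil => rfl
  | cons x xs ih =>
    simp only [List.foldl_cons, ih, List.reverse_cons, List.find?_append]
    cases h : xs.reverse.find? (fun kv => PySem.Str.lower kv.1 == k) with
    | some y => simp
    | none =>
      simp only [List.find?_cons, List.find?_nil]
      by_cases hk : PySem.Str.lower x.1 == k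
      · simp only [hk]
        have hkk : k = PySem.Str.lower x.1 := (beq_iff_eq.mp hk).symm
        subst hkk
        simp [PySem.Dict.get?_insert_self]
      · simp only [hk]
        simp [PySem.Dict.get?_insert_of_ne _ _ (fun h' => hk (beq_iff_eq.mpr h'.symm))]

theorem pv_classify_other (v : String) (hv1 : v ≠ "supported") (hv2 : v ≠ "partially_supported") :
    pvClassify v = "x" := by
  simp only [pvClassify, PySem.Dict.get?_mk_cons]
  rw [if_neg (by simp [beq_iff_eq]; exact fun h => hv1 h.symm),
      if_neg (by simp [beq_iff_eq]; exact fun h => hv2 h.symm)]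
  rfl

-- The merged dict looks up exactly A's precedence chain.
theorem pv_lookup (supported partial_ : List String) (items : List (String × String)) (low : String) :
    PySem.Dict.get?
      (supported.foldl (fun d s => d.insert (PySem.Str.lower s) "s")
        (partial_.foldl (fun d p => d.insert (PySem.Str.lower p) "f")
          (items.foldl (fun d kv => d.insert (PySem.Str.lower kv.1) (pvClassify kv.2)) PySem.Dict.empty))) low =
      (if low ∈ PySem.Set.ofList (supported.map PySem.Str.lower) then some "s"
       else if low ∈ PySem.Set.ofList (partial_.map PySem.Str.lower) then some "f"
       else (PySem.Dict.get?
              (items.foldl (fun d kv => d.insert (PySem.Str.lower kv.1) kv.2) PySem.Dict.empty) low).map pvClassify) := by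
  rw [pv_get?_layer_const, pv_get?_layer_const,
      pv_get?_layer_items pvClassify, pv_get?_layer_items (fun v => v)]
  by_cases h2 : low ∈ PySem.Set.ofList (supported.map PySem.Str.lower)
  · simp [h2]
  · simp only [if_neg h2]
    by_cases h3 : low ∈ PySem.Set.ofList (partial_.map PySem.Str.lower)
    · simp [h3]
    · simp only [if_neg h3]
      cases hi : items.reverse.find? (fun kv => PySem.Str.lower kv.1 == low) <;>
        simp [PySem.Dict.get?_empty]

-- The tag a raw addition receives from B's merged dict: none = skipped by the cleaning guards.
def pvTagF (merged : PySem.Dict String String) (raw : String) : Option (String × Option String) :=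
  if raw = "" then none
  else if PySem.Str.strip (PySem.Str.lower raw) = "" then none
  else some (raw, merged.get? (PySem.Str.strip (PySem.Str.lower raw)))

-- One classify-and-append step over a tagged pair (the merged-dict form of A's step).
def pvStep (st : List String × List String) (rc : String × Option String) : List String × List String :=
  if rc.2 = some "s" then (if rc.1 ∈ st.1 then st else (st.1 ++ [rc.1], st.2))
  else if rc.2 = some "f" then (if rc.1 ∈ st.2 then st else (st.1, st.2 ++ [rc.1]))
  else st

-- A's per-item step equals the merged-dict step applied to the item's tag.
theorem pv_step_eq (supported partial_ : List String) (items : List (String × String))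
    (st : List String × List String) (raw : String) :
    (if raw = "" then st
     else if PySem.Str.strip (PySem.Str.lower raw) = "" then st
     else if PySem.Str.strip (PySem.Str.lower raw) ∈ PySem.Set.ofList (supported.map PySem.Str.lower) then
       (if raw ∈ st.1 then st else (st.1 ++ [raw], st.2))
     else if PySem.Str.strip (PySem.Str.lower raw) ∈ PySem.Set.ofList (partial_.map PySem.Str.lower) then
       (if raw ∈ st.2 then st else (st.1, st.2 ++ [raw]))
     else if PySem.Dict.get?
         (items.foldl (fun d kv => d.insert (PySem.Str.lower kv.1) kv.2) PySem.Dict.empty)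
         (PySem.Str.strip (PySem.Str.lower raw)) = some "supported" then
       (if raw ∈ st.1 then st else (st.1 ++ [raw], st.2))
     else if PySem.Dict.get?
         (items.foldl (fun d kv => d.insert (PySem.Str.lower kv.1) kv.2) PySem.Dict.empty)
         (PySem.Str.strip (PySem.Str.lower raw)) = some "partially_supported" then
       (if raw ∈ st.2 then st else (st.1, st.2 ++ [raw]))
     else st) =
    (match pvTagF
        (supported.foldl (fun d s => d.insert (PySem.Str.lower s) "s")
          (partial_.foldl (fun d p => d.insert (PySem.Str.lower p) "f")
            (items.foldl (fun d kv => d.insert (PySem.Str.lower kv.1) (pvClassify kv.2)) PySem.Dict.empty)))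
        raw with
     | none => st
     | some rc => pvStep st rc) := by
  by_cases h0 : raw = ""
  · simp [h0, pvTagF]
  · by_cases h1 : PySem.Str.strip (PySem.Str.lower raw) = ""
    · simp [pvTagF, h0, h1]
    · simp only [pvTagF, if_neg h0, if_neg h1, pvStep, pv_lookup]
      by_cases h2 : PySem.Str.strip (PySem.Str.lower raw) ∈ PySem.Set.ofList (supported.map PySem.Str.lower)
      · simp [h2]
      · simp only [if_neg h2]
        by_cases h3 : PySem.Str.strip (PySem.Str.lower raw) ∈ PySem.Set.ofList (partial_.map PySem.Str.lower)
        · simp [h3]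
        · simp only [if_neg h3]
          cases hl : PySem.Dict.get?
              (items.foldl (fun d kv => d.insert (PySem.Str.lower kv.1) kv.2) PySem.Dict.empty)
              (PySem.Str.strip (PySem.Str.lower raw)) with
          | none => simp
          | some v =>
            simp only [Option.map_some]
            by_cases hv1 : v = "supported"
            · subst hv1
              simp [show pvClassify "supported" = "s" from rfl]
            · by_cases hv2 : v = "partially_supported"
              · subst hv2
                simp [show pvClassify "partially_supported" = "f" from rfl, hv1]
              · simp only [pv_classify_other v hv1 hv2]
                simp [hv1, hv2]

-- B's tagging loop is the filterMap of pvTagF.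
theorem pv_tag_fold (merged : PySem.Dict String String) (additions : List (String))
    (acc : List (String × Option String)) :
    additions.foldl
      (fun acc raw =>
        if raw = "" then acc
        else
          if PySem.Str.strip (PySem.Str.lower raw) = "" then acc
          else acc ++ [(raw, merged.get? (PySem.Str.strip (PySem.Str.lower raw)))]) acc =
      acc ++ additions.filterMap (pvTagF merged) := by
  induction additions generalizing acc with
  | nil => simp
  | cons raw rest ih =>
    simp only [List.foldl_cons, List.filterMap_cons, pvTagF]
    by_cases h0 : raw = ""
    · simp [pvTagF, h0, ih]
    · by_cases h1 : PySem.Str.strip (PySem.Str.lower raw) = ""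
      · simp [pvTagF, h0, h1, ih]
      · simp [pvTagF, h0, h1, ih]

-- Folding pvStep over tagged pairs splits into two independent dedup folds.
theorem pv_collect (ts : List (String × Option String)) (s0 f0 : List String) :
    ts.foldl pvStep (s0, f0) =
      ((ts.filterMap (fun rc => if rc.2 = some "s" then some rc.1 else none)).foldl PySem.Set.add s0,
       (ts.filterMap (fun rc => if rc.2 = some "f" then some rc.1 else none)).foldl PySem.Set.add f0) := by
  induction ts generalizing s0 f0 with
  | nil => simp
  | cons rc rest ih =>
    simp only [List.foldl_cons, List.filterMap_cons]
    by_cases hs : rc.2 = some "s"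
    · simp only [hs, pvStep]
      rw [show (if rc.1 ∈ s0 then (s0, f0) else (s0 ++ [rc.1], f0)) =
            ((PySem.Set.add s0 rc.1 : List String), f0) by
          rw [PySem.Set.add_eq_ite]; by_cases h : rc.1 ∈ s0 <;> simp [h]]
      simp [ih]
    · by_cases hf : rc.2 = some "f"
      · simp only [hf, pvStep]
        simp only [show (some "f" = some "s") = False by simp, if_false]
        rw [show (if rc.1 ∈ f0 then (s0, f0) else (s0, f0 ++ [rc.1])) =
              (s0, (PySem.Set.add f0 rc.1 : List String)) by
            rw [PySem.Set.add_eq_ite]; by_cases h : rc.1 ∈ f0 <;> simp [h]]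
        simp [ih]
      · simp [pvStep, hs, hf, ih]

-- A's loop over additions is the fold of pvStep over the tagged list.
theorem pv_fold_as_tagged (merged : PySem.Dict String String) (F : (List String × List String) → String → (List String × List String))
    (hF : ∀ st raw, F st raw = (match pvTagF merged raw with | none => st | some rc => pvStep st rc))
    (additions : List String) (st : List String × List String) :
    additions.foldl F st = (additions.filterMap (pvTagF merged)).foldl pvStep st := by
  induction additions generalizing st with
  | nil => rfl
  | cons raw rest ih =>
    simp only [List.foldl_cons, List.filterMap_cons, hF]
    cases h : pvTagF merged raw with
    | none => simp [ih]
    | some rc => simp [ih]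

theorem filter_additions_py_spec : Claim_equal_filter_additions_py := by
  intro additions coverage supported partial_ _
  unfold Spec_filter_additions_py
  unfold filter_additions_py filter_additions_py_alt
  have main : ∀ (items : List (String × String)),
      additions.foldl
        (fun st raw =>
          if raw = "" then st
          else if PySem.Str.strip (PySem.Str.lower raw) = "" then st
          else if PySem.Str.strip (PySem.Str.lower raw) ∈ PySem.Set.ofList (supported.map PySem.Str.lower) then
            (if raw ∈ st.1 then st else (st.1 ++ [raw], st.2))
          else if PySem.Str.strip (PySem.Str.lower raw) ∈ PySem.Set.ofList (partial_.map PySem.Str.lower) then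
            (if raw ∈ st.2 then st else (st.1, st.2 ++ [raw]))
          else if PySem.Dict.get?
              (items.foldl (fun d kv => d.insert (PySem.Str.lower kv.1) kv.2) PySem.Dict.empty)
              (PySem.Str.strip (PySem.Str.lower raw)) = some "supported" then
            (if raw ∈ st.1 then st else (st.1 ++ [raw], st.2))
          else if PySem.Dict.get?
              (items.foldl (fun d kv => d.insert (PySem.Str.lower kv.1) kv.2) PySem.Dict.empty)
              (PySem.Str.strip (PySem.Str.lower raw)) = some "partially_supported" then
            (if raw ∈ st.2 then st else (st.1, st.2 ++ [raw]))
          else st)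
        ([], []) =
      (let merged :=
        supported.foldl (fun d s => d.insert (PySem.Str.lower s) "s")
          (partial_.foldl (fun d p => d.insert (PySem.Str.lower p) "f")
            (items.foldl (fun d kv => d.insert (PySem.Str.lower kv.1) (pvClassify kv.2)) PySem.Dict.empty))
       let tagged := additions.foldl
          (fun acc raw =>
            if raw = "" then acc
            else
              if PySem.Str.strip (PySem.Str.lower raw) = "" then acc
              else acc ++ [(raw, merged.get? (PySem.Str.strip (PySem.Str.lower raw)))]) []
       (PySem.List.dedup (tagged.filterMap (fun rc => if rc.2 = some "s" then some rc.1 else none)),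
        PySem.List.dedup (tagged.filterMap (fun rc => if rc.2 = some "f" then some rc.1 else none)))) := by
    intro items
    simp only []
    rw [pv_tag_fold, List.nil_append,
        pv_fold_as_tagged _ _ (fun st raw => pv_step_eq supported partial_ items st raw),
        pv_collect]
    simp [PySem.List.dedup_eq_ofList, PySem.Set.ofList_eq_foldl]
  cases coverage with
  | none => exact main []
  | some c =>
    by_cases hc : c = []
    · simp only [if_pos hc]
      exact main []
    · simp only [if_neg hc]
      exact main ((PySem.Dict.get? (PySem.Dict.mk c) "support_level_map").getD [])
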